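-- pv_equiv track=rewrite | github.com/FGluis/Primer_Laboratorio_ED2 | Laboratorio_1/Punto1/Drive.py | Id_to_number
-- ===== SOURCE A (Python) =====
-- def Id_to_number(id: str) -> int:
--     '''
--     Esta funcion nos transforma un User_Id en un numero entero
--     La logica detras es transformar en entero cada caracter del string ingresado
--     Para despues sumarlos en un solo entero (Es claro que puede llegar a repetirse
--     algun numero en algun caso especial pero no se tendra encuenta)
--     Input():
--                 ID: es el id del usuario
--     Output():
--                 New_Id: Es la conversion numerica del id
--     '''
--     #Inicializamos nuestra nueva variable
--     newid = ""
--     #Verificamos que el ID sea un numero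
--     if id.isnumeric():
--         newid = id
--     else:
--         #Sino recorremos todo nuestro str para identificar caracter por caracter
--         #Al identificarlo lo transformamos en entero y lo concatenamos a la nueva variable
--         for i in id:
--             if i.isnumeric():
--                 newid = newid + i
--             elif i.isalpha():
--                 newid = newid + str(ord(i) - 96)
--             else:
--                 newid = newid + str(ord(i))
--     Newid = 0
--     #Luego recorremos todo nuestra nueva variable y sumamos todos los numeros dentro del str
--     #Esto con fin de simpplificar el id
--     for i in newid:
--         Newid = int(i) + Newid
--     return int(Newid)
-- ===== SOURCE B (Python) =====
-- def Id_to_number(id: str) -> int: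
--     # One pass: no intermediate string -- add each character's digit sum directly.
--     total = 0
--     for c in id:
--         if c.isnumeric():
--             n = ord(c) - 48
--         elif c.isalpha():
--             n = ord(c) - 96
--         else:
--             n = ord(c)
--         total += _digit_sum(n)
--     return total
--
-- def _digit_sum(n: int) -> int:
--     n = abs(n)
--     s = 0
--     while n:
--         s += n % 10
--         n //= 10
--     return s
-- ===== Notes on version B (the rewrite author's own statement) =====
-- stated objective: simpler
-- what changed: B eliminates A's intermediate digit string (A builds a string representation per character, concatenates, then re-scans it converting each char back with int()): a single pass adds each character's decimal digit sum directly to an integer accumulator.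
import Mathlib
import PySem

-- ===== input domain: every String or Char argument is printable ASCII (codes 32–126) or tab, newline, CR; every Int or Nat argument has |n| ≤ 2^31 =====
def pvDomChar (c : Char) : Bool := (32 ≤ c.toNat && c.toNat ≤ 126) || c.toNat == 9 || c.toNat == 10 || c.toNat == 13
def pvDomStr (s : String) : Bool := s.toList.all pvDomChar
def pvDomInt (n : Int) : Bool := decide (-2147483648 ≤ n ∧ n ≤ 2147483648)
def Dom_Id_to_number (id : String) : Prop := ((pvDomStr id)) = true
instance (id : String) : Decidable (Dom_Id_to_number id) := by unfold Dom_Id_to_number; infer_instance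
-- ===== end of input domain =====

-- B replaces A's build-intermediate-digit-string-then-resum two-pass scheme by a single
-- accumulating pass that adds each character's digit sum directly (objective: simpler).

-- ===== PORT A =====
-- str.isnumeric coincides with str.isdigit on the printable-ASCII domain, so it is ported as strIsdigit/isdigit.
def Id_to_number (id : String) : Int :=
  let newid : List Char :=
    if PySem.Chars.strIsdigit id.toList then id.toList
    else id.toList.foldl (fun newid i =>
      if PySem.Chars.isdigit i then newid ++ [i]
      else if PySem.Chars.isalpha i then newid ++ PySem.Int.toChars ((i.toNat : Int) - 96)
      else newid ++ PySem.Int.toChars (i.toNat : Int)) ([] : List Char)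
  -- int(i) on each character of newid; none = ValueError, excluded by Pre_; the final int(Newid) is the identity
  (newid.foldl (fun acc i => acc.bind fun nw => (PySem.Int.ofChars? [i]).map (· + nw)) (some 0)).getD 0

-- ===== PORT B =====
-- _digit_sum: n = abs(n); while n: s += n % 10; n //= 10  (fuel makes the while loop structural; fuel = n always suffices)
def pvDigitSumAux : Nat → Nat → Int → Int
  | 0, _, s => s
  | fuel + 1, n, s => if n = 0 then s else pvDigitSumAux fuel (n / 10) (s + (n % 10 : Nat))

def pvDigitSum (n : Int) : Int := pvDigitSumAux n.natAbs n.natAbs 0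

def Id_to_number_alt (id : String) : Int :=
  id.toList.foldl (fun total c =>
    let n : Int :=
      if PySem.Chars.isdigit c then (c.toNat : Int) - 48
      else if PySem.Chars.isalpha c then (c.toNat : Int) - 96
      else (c.toNat : Int)
    total + pvDigitSum n) 0

-- ===== PRECONDITION & SPEC =====
-- Pre_ excludes exactly the strings containing an upper-case ASCII letter: for those characters
-- str(ord(c) - 96) is negative, its sign character reaches int() in A's second loop, and A raises ValueError.
def Pre_Id_to_number (id : String) : Prop := id.toList.all (fun c => !(decide ('A' ≤ c) && decide (c ≤ 'Z'))) = true
instance (id : String) : Decidable (Pre_Id_to_number id) := by unfold Pre_Id_to_number; infer_instance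
def pvWitness_Id_to_number : String := "ab12! x"

def Spec_Id_to_number (id : String) (out : Int) : Prop := out = Id_to_number_alt id
instance (id : String) (out : Int) : Decidable (Spec_Id_to_number id out) := by unfold Spec_Id_to_number; infer_instance

-- ===== CLAIM (what is proved, stated in full; the proofs are below) =====
def Claim_equal_Id_to_number : Prop := ∀ (id : String), Dom_Id_to_number id → Pre_Id_to_number id → Spec_Id_to_number id (Id_to_number id)

-- ===== LEMMAS AND PROOFS =====

-- the digit string A appends for one character
def pvRep (c : Char) : List Char :=
  if PySem.Chars.isdigit c then [c]
  else if PySem.Chars.isalpha c then PySem.Int.toChars ((c.toNat : Int) - 96)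
  else PySem.Int.toChars (c.toNat : Int)

-- what B adds for one character
def pvContrib (c : Char) : Int :=
  pvDigitSum (if PySem.Chars.isdigit c then (c.toNat : Int) - 48
    else if PySem.Chars.isalpha c then (c.toNat : Int) - 96
    else (c.toNat : Int))

-- the per-character facts, decided by enumerating the 128 ASCII codes
abbrev pvCharFact (n : Nat) : Prop :=
  (PySem.Chars.isdigit (Char.ofNat n) = true →
    PySem.Int.ofChars? [Char.ofNat n] = some (((Char.ofNat n).toNat : Int) - 48)) ∧
  (pvDomChar (Char.ofNat n) = true → ¬('A' ≤ Char.ofNat n ∧ Char.ofNat n ≤ 'Z') →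
    ((pvRep (Char.ofNat n)).all PySem.Chars.isdigit = true ∧
     ((pvRep (Char.ofNat n)).map (fun d => (d.toNat : Int) - 48)).sum = pvContrib (Char.ofNat n)))

set_option maxRecDepth 8192 in
lemma pvCharFact_all : ∀ n ∈ List.range 128, pvCharFact n := by decide

lemma pvIsdigit_lt (c : Char) (h : PySem.Chars.isdigit c = true) : c.toNat < 128 := by
  simp only [PySem.Chars.isdigit, Bool.and_eq_true, decide_eq_true_eq] at h
  rw [Char.le_def] at h
  have h2 := UInt32.le_iff_toNat_le.mp h.2
  have h9 : ('9').val.toNat = 57 := rfl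
  have hc : c.toNat = c.val.toNat := rfl
  omega

lemma pvAsciiLt (c : Char) (h : pvDomChar c = true) : c.toNat < 128 := by
  simp [pvDomChar] at h; omega

lemma pvCharFact_of (c : Char) (h : c.toNat < 128) : pvCharFact c.toNat :=
  pvCharFact_all c.toNat (List.mem_range.mpr h)

lemma pvOfChars_digit (c : Char) (h : PySem.Chars.isdigit c = true) :
    PySem.Int.ofChars? [c] = some ((c.toNat : Int) - 48) := by
  have := (pvCharFact_of c (pvIsdigit_lt c h)).1
  rw [Char.ofNat_toNat] at this
  exact this h

lemma pvRep_digits (c : Char) (hd : pvDomChar c = true) (hu : ¬('A' ≤ c ∧ c ≤ 'Z')) :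
    (pvRep c).all PySem.Chars.isdigit = true := by
  have := (pvCharFact_of c (pvAsciiLt c hd)).2
  rw [Char.ofNat_toNat] at this
  exact (this hd hu).1

lemma pvRep_sum (c : Char) (hd : pvDomChar c = true) (hu : ¬('A' ≤ c ∧ c ≤ 'Z')) :
    ((pvRep c).map (fun d => (d.toNat : Int) - 48)).sum = pvContrib c := by
  have := (pvCharFact_of c (pvAsciiLt c hd)).2
  rw [Char.ofNat_toNat] at this
  exact (this hd hu).2

-- A's first loop builds the concatenation of the per-character digit strings
lemma pvLoop1 (cs : List Char) (acc : List Char) :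
    cs.foldl (fun newid i =>
      if PySem.Chars.isdigit i then newid ++ [i]
      else if PySem.Chars.isalpha i then newid ++ PySem.Int.toChars ((i.toNat : Int) - 96)
      else newid ++ PySem.Int.toChars (i.toNat : Int)) acc = acc ++ cs.flatMap pvRep := by
  induction cs generalizing acc with
  | nil => simp
  | cons c cs ih =>
      simp only [List.foldl_cons, ih, List.flatMap_cons]
      unfold pvRep
      split_ifs <;> simp

-- an all-digit string is its own digit representation
lemma pvRep_id (cs : List Char) (h : ∀ c ∈ cs, PySem.Chars.isdigit c = true) :
    cs.flatMap pvRep = cs := by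
  induction cs with
  | nil => rfl
  | cons c cs ih =>
      have hc := h c (by simp)
      simp only [List.flatMap_cons, pvRep, hc, if_pos]
      simp [ih fun d hd => h d (by simp [hd])]

lemma pvSum_flatMap (f : Char → List Int) (l : List Char) :
    (l.flatMap f).sum = (l.map (fun x => (f x).sum)).sum := by
  induction l with
  | nil => rfl
  | cons c cs ih => simp [ih]

-- A's second loop on an all-digit string sums the digit values
lemma pvLoop2 (cs : List Char) (h : ∀ c ∈ cs, PySem.Chars.isdigit c = true) (a : Int) :
    cs.foldl (fun acc i => acc.bind fun nw => (PySem.Int.ofChars? [i]).map (· + nw)) (some a)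
      = some (a + (cs.map (fun d => (d.toNat : Int) - 48)).sum) := by
  induction cs generalizing a with
  | nil => simp
  | cons c cs ih =>
      have hc := h c (by simp)
      simp only [List.foldl_cons, Option.bind_some, pvOfChars_digit c hc, Option.map_some]
      rw [ih (fun d hd => h d (by simp [hd]))]
      simp only [List.map_cons, List.sum_cons]
      ring_nf

theorem pv_main (id : String) (hdom : Dom_Id_to_number id) (hpre0 : Pre_Id_to_number id) :
    Id_to_number id = Id_to_number_alt id := by
  unfold Dom_Id_to_number pvDomStr at hdom
  rw [List.all_eq_true] at hdom
  have hpre : ∀ c ∈ id.toList, ¬('A' ≤ c ∧ c ≤ 'Z') := by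
    intro c hc
    have := List.all_eq_true.mp hpre0 c hc
    intro ⟨h1, h2⟩
    simp [h1, h2] at this
  have hnewid : (if PySem.Chars.strIsdigit id.toList then id.toList
      else id.toList.foldl (fun newid i =>
        if PySem.Chars.isdigit i then newid ++ [i]
        else if PySem.Chars.isalpha i then newid ++ PySem.Int.toChars ((i.toNat : Int) - 96)
        else newid ++ PySem.Int.toChars (i.toNat : Int)) ([] : List Char))
      = id.toList.flatMap pvRep := by
    split_ifs with hnum
    · rw [pvRep_id]
      intro c hc
      simp only [PySem.Chars.strIsdigit, Bool.and_eq_true, List.all_eq_true] at hnum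
      exact hnum.2 c hc
    · exact pvLoop1 _ _
  have hdig : ∀ d ∈ id.toList.flatMap pvRep, PySem.Chars.isdigit d = true := by
    intro d hd
    rw [List.mem_flatMap] at hd
    obtain ⟨c, hc, hdc⟩ := hd
    have := pvRep_digits c (hdom c hc) (hpre c hc)
    rw [List.all_eq_true] at this
    exact this d hdc
  unfold Id_to_number Id_to_number_alt
  simp only [hnewid, pvLoop2 _ hdig 0, Option.getD_some, zero_add]
  rw [List.map_flatMap, pvSum_flatMap]
  rw [PySem.List.foldl_add id.toList (fun c =>
      pvDigitSum (if PySem.Chars.isdigit c then (c.toNat : Int) - 48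
        else if PySem.Chars.isalpha c then (c.toNat : Int) - 96
        else (c.toNat : Int))) 0]
  rw [zero_add]
  apply congrArg
  apply List.map_congr_left
  intro c hc
  have := pvRep_sum c (hdom c hc) (hpre c hc)
  simpa [pvContrib] using this

-- ===== VERDICT (by name: the statement is the Claim_ definition above) =====
theorem Id_to_number_spec : Claim_equal_Id_to_number := by
  intro id hdom hpre
  unfold Spec_Id_to_number
  exact pv_main id hdom hpre
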